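-- pv_equiv track=rewrite | github.com/thomascp2/rebounds-assists | output/lineup_builder.py | _lineup_valid
-- ===== SOURCE A (Python) =====
-- from collections import Counter
--
-- def _lineup_valid(legs: list[dict], size: int) -> bool:
--     players = [l["player_name"] for l in legs]
--     if len(set(players)) != len(players):
--         return False
--
--     teams = [l["team"] for l in legs]
--     max_same_team = 2 if size <= 4 else 3
--     if max(Counter(teams).values(), default=0) > max_same_team:
--         return False
--
--     tiers = [l["prop_tier"] for l in legs]
--     if all(t == "goblin" for t in tiers):
--         return False
--     if size == 2 and tiers.count("goblin") >= 2:
--         return False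
--
--     # No 3+ demons same category same team
--     for team in set(teams):
--         team_legs = [l for l in legs if l["team"] == team]
--         for cat in set(l["stat_category"] for l in team_legs):
--             demons = sum(
--                 1 for l in team_legs
--                 if l["stat_category"] == cat and l["prop_tier"] == "demon"
--             )
--             if demons >= 3:
--                 return False
--
--     return True
-- ===== SOURCE B (Python) =====
-- from collections import Counter
--
-- def _lineup_valid(legs: list[dict], size: int) -> bool:
--     players = Counter(l["player_name"] for l in legs)
--     if any(c > 1 for c in players.values()):
--         return False
--
--     teams = Counter(l["team"] for l in legs)
--     max_same_team = 2 if size <= 4 else 3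
--     if any(c > max_same_team for c in teams.values()):
--         return False
--
--     goblins = sum(1 for l in legs if l["prop_tier"] == "goblin")
--     if goblins == len(legs):
--         return False
--     if size == 2 and goblins >= 2:
--         return False
--
--     demons = Counter(
--         (l["team"], l["stat_category"])
--         for l in legs
--         if l["prop_tier"] == "demon"
--     )
--     return all(c < 3 for c in demons.values())
-- ===== Notes on version B (the rewrite author's own statement) =====
-- stated objective: alternative
-- what changed: Replaces A's set-length duplicate test, max-with-default team test and nested per-team/per-category demon rescans by Counter indexes built in one pass each (players, teams, and (team, stat_category) over demon legs), each checked with a single any/all.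
import Mathlib
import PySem

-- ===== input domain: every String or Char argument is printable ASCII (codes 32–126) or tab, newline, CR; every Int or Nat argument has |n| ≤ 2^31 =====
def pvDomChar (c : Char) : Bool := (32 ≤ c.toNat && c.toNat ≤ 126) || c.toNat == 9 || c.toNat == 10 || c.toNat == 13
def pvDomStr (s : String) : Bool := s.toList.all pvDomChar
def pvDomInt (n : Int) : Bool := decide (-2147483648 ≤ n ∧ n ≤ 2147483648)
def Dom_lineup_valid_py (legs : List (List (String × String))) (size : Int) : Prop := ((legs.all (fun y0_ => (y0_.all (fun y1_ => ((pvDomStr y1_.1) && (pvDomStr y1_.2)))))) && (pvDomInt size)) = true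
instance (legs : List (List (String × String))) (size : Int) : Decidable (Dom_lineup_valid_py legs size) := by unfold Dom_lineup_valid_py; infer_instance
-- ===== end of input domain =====

-- B replaces A's set-length duplicate test, max-with-default team test and nested per-team/per-category demon rescans by Counter indexes built in one pass each, checked with any/all (alternative algorithm; avoids A's repeated filtering).

-- ===== PORT A =====
-- l["k"]: dict lookup, exact when the key is present (guaranteed by Pre_)
def pvGet (l : List (String × String)) (k : String) : String :=
  ((PySem.Dict.mk l).get? k).getD ""

def lineup_valid_py (legs : List (List (String × String))) (size : Int) : Bool :=
  let players := legs.map (fun l => pvGet l "player_name")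
  if (PySem.Set.ofList players).length ≠ players.length then false
  else
    let teams := legs.map (fun l => pvGet l "team")
    let max_same_team : Int := if size ≤ 4 then 2 else 3
    if ((PySem.List.max? (PySem.Dict.counter teams).values (fun v => v)).getD 0) > max_same_team then false
    else
      let tiers := legs.map (fun l => pvGet l "prop_tier")
      if tiers.all (fun t => t == "goblin") then false
      else if size == 2 && 2 ≤ tiers.count "goblin" then false
      else
        -- 'for team in set(teams): for cat in …: if demons >= 3: return False' — an early-exit scan, i.e. an existence test
        if (PySem.Set.ofList teams).any (fun team =>
             let team_legs := legs.filter (fun l => pvGet l "team" == team)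
             (PySem.Set.ofList (team_legs.map (fun l => pvGet l "stat_category"))).any (fun cat =>
               3 ≤ ((team_legs.countP (fun l => pvGet l "stat_category" == cat && pvGet l "prop_tier" == "demon")) : Int)))
        then false else true

-- ===== PORT B =====
def lineup_valid_py_alt (legs : List (List (String × String))) (size : Int) : Bool :=
  let players := PySem.Dict.counter (legs.map (fun l => pvGet l "player_name"))
  if players.values.any (fun c => 1 < c) then false
  else
    let teams := PySem.Dict.counter (legs.map (fun l => pvGet l "team"))
    let max_same_team : Int := if size ≤ 4 then 2 else 3
    if teams.values.any (fun c => max_same_team < c) then false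
    else
      let goblins : Int := legs.countP (fun l => pvGet l "prop_tier" == "goblin")
      if goblins = (legs.length : Int) then false
      else if size == 2 && 2 ≤ goblins then false
      else
        let demons := PySem.Dict.counter
          ((legs.filter (fun l => pvGet l "prop_tier" == "demon")).map (fun l => (pvGet l "team", pvGet l "stat_category")))
        demons.values.all (fun c => c < 3)

-- ===== PRECONDITION & SPEC =====
-- Pre_ is exactly the inputs on which A completes without KeyError: each of the four dict keys is
-- required on every leg only at the stage where A first reads it (later stages are guarded by the
-- earlier early-return conditions), so nothing on which A returns is excluded.
def Pre_lineup_valid_py (legs : List (List (String × String))) (size : Int) : Prop :=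
  (∀ l ∈ legs, ((PySem.Dict.mk l).contains "player_name") = true) ∧
  ((legs.map (fun l => pvGet l "player_name")).Nodup →
    (∀ l ∈ legs, ((PySem.Dict.mk l).contains "team") = true)) ∧
  ((legs.map (fun l => pvGet l "player_name")).Nodup →
    (∀ t ∈ legs.map (fun l => pvGet l "team"),
      ((legs.map (fun l => pvGet l "team")).count t : Int) ≤ (if size ≤ 4 then 2 else 3)) →
    (∀ l ∈ legs, ((PySem.Dict.mk l).contains "prop_tier") = true)) ∧
  ((legs.map (fun l => pvGet l "player_name")).Nodup →
    (∀ t ∈ legs.map (fun l => pvGet l "team"),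
      ((legs.map (fun l => pvGet l "team")).count t : Int) ≤ (if size ≤ 4 then 2 else 3)) →
    ¬ (∀ l ∈ legs, pvGet l "prop_tier" = "goblin") →
    ¬ (size = 2 ∧ 2 ≤ legs.countP (fun l => pvGet l "prop_tier" == "goblin")) →
    (∀ l ∈ legs, ((PySem.Dict.mk l).contains "stat_category") = true))
instance (legs : List (List (String × String))) (size : Int) : Decidable (Pre_lineup_valid_py legs size) := by unfold Pre_lineup_valid_py; infer_instance

def pvWitness_lineup_valid_py : (List (List (String × String))) × Int :=
  ([[("player_name", "a"), ("team", "X"), ("prop_tier", "demon"), ("stat_category", "pts")],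
    [("player_name", "b"), ("team", "X"), ("prop_tier", "goblin"), ("stat_category", "reb")]], 2)

def Spec_lineup_valid_py (legs : List (List (String × String))) (size : Int) (out : Bool) : Prop := out = lineup_valid_py_alt legs size
instance (legs : List (List (String × String))) (size : Int) (out : Bool) : Decidable (Spec_lineup_valid_py legs size out) := by unfold Spec_lineup_valid_py; infer_instance

-- ===== CLAIM (what is proved, stated in full; the proofs are below) =====
def Claim_equal_lineup_valid_py : Prop := ∀ (legs : List (List (String × String))) (size : Int), Dom_lineup_valid_py legs size → Pre_lineup_valid_py legs size → Spec_lineup_valid_py legs size (lineup_valid_py legs size)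

-- ===== LEMMAS AND PROOFS =====

-- set(xs) has full length iff xs has no duplicates
theorem pv_len_ofList_eq_iff {α : Type} [BEq α] [LawfulBEq α] (P : List α) :
    (PySem.Set.ofList P).length = P.length ↔ P.Nodup := by
  induction P using List.reverseRecOn with
  | nil => simp [PySem.Set.ofList]
  | append_singleton xs x ih =>
    rw [PySem.Set.ofList_append_singleton]
    have hnd : (xs ++ [x]).Nodup ↔ xs.Nodup ∧ x ∉ xs := by
      simp [List.nodup_append]; aesop
    by_cases hx : x ∈ PySem.Set.ofList xs
    · rw [PySem.Set.add_of_mem hx]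
      have hle := PySem.Set.length_ofList_le (xs := xs)
      have hmem : x ∈ xs := (PySem.Set.mem_ofList xs x).1 hx
      simp only [List.length_append, List.length_cons, List.length_nil, hnd]
      constructor
      · intro h; omega
      · intro h; exact absurd hmem h.2
    · rw [PySem.Set.add_of_not_mem hx]
      have hmem : x ∉ xs := fun h => hx ((PySem.Set.mem_ofList xs x).2 h)
      simp only [List.length_append, List.length_cons, List.length_nil, hnd]
      constructor
      · intro h; exact ⟨ih.1 (by omega), hmem⟩
      · intro h; have := ih.2 h.1; omega


-- duplicate-player guard: len(set(P)) != len(P)  ↔  some multiplicity in Counter(P) exceeds 1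
theorem pv_dup_guard (P : List String) :
    (¬ (PySem.Set.ofList P).length = P.length) ↔
      ((PySem.Dict.counter P).values.any (fun c => 1 < c) = true) := by
  have hv : (PySem.Dict.counter P).values
      = (PySem.Set.ofList P).map (fun k => (P.count k : Int)) := by
    simp only [PySem.Dict.values, PySem.Dict.items_counter, List.map_map]; rfl
  rw [hv, List.any_map]
  constructor
  · intro h
    have hnd : ¬ P.Nodup := fun hn => h ((pv_len_ofList_eq_iff P).mpr hn)
    rw [List.nodup_iff_count_le_one] at hnd
    push Not at hnd
    obtain ⟨a, ha⟩ := hnd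
    have hmem : a ∈ P := List.count_pos_iff.mp (by omega)
    refine List.any_eq_true.mpr ⟨a, (PySem.Set.mem_ofList P a).mpr hmem, ?_⟩
    simp only [Function.comp]
    exact decide_eq_true (by exact_mod_cast ha)
  · intro h hlen
    obtain ⟨a, _, ha⟩ := List.any_eq_true.mp h
    simp only [Function.comp, decide_eq_true_eq] at ha
    have h2 : 2 ≤ P.count a := by exact_mod_cast ha
    have := (List.nodup_iff_count_le_one.mp ((pv_len_ofList_eq_iff P).mp hlen)) a
    omega

-- max(vs, default=0) > m  ↔  any element exceeds m   (for positive m)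
theorem pv_max_guard (vs : List Int) (m : Int) (hm : 0 < m) :
    ((PySem.List.max? vs (fun v => v)).getD 0 > m) ↔ (vs.any (fun c => m < c) = true) := by
  cases hmax : PySem.List.max? vs (fun v => v) with
  | none =>
    have hnil : vs = [] := (PySem.List.max?_eq_none_iff vs (fun v => v)).mp hmax
    subst hnil
    simp
    omega
  | some mx =>
    have hmem : mx ∈ vs := PySem.List.max?_mem hmax
    have hall : ∀ y ∈ vs, y ≤ mx := PySem.List.max?_isMax hmax
    simp only [Option.getD_some, gt_iff_lt, List.any_eq_true, decide_eq_true_eq]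
    exact ⟨fun h => ⟨mx, hmem, h⟩, fun ⟨c, hc, h⟩ => lt_of_lt_of_le h (hall c hc)⟩

-- all tiers goblin  ↔  goblin count equals the number of legs
theorem pv_goblin_all (legs : List (List (String × String))) (f : List (String × String) → String) :
    ((legs.map f).all (fun t => t == "goblin") = true) ↔
      ((legs.countP (fun l => f l == "goblin") : Int) = (legs.length : Int)) := by
  rw [Int.natCast_inj, List.countP_eq_length]
  rw [List.all_map, List.all_eq_true]
  simp [Function.comp]

-- tiers.count("goblin") as a countP over the legs
theorem pv_goblin_count (legs : List (List (String × String))) (f : List (String × String) → String) :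
    (legs.map f).count "goblin" = legs.countP (fun l => f l == "goblin") := by
  rw [List.count_eq_countP, List.countP_map]
  rfl

-- the two counts of demon legs of one (team, category) pair are the same count
theorem pv_demon_count (legs : List (List (String × String)))
    (ft fc fd : List (String × String) → String) (t c : String) :
    ((legs.filter (fun l => ft l == t)).countP (fun l => fc l == c && fd l == "demon"))
    = (((legs.filter (fun l => fd l == "demon")).map (fun l => (ft l, fc l))).count (t, c)) := by
  rw [List.count_eq_countP, List.countP_map, List.countP_filter, List.countP_filter]
  refine List.countP_congr ?_
  intro l _
  simp only [Function.comp]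
  cases h1 : ft l == t <;> cases h2 : fc l == c <;> cases h3 : fd l == "demon" <;>
    simp_all [beq_iff_eq, Prod.ext_iff]

-- the nested demon scan is an existence test on the (team, category) demon counter
theorem pv_demon_guard (legs : List (List (String × String)))
    (ft fc fd : List (String × String) → String) :
    ((PySem.Set.ofList (legs.map ft)).any (fun team =>
        (PySem.Set.ofList ((legs.filter (fun l => ft l == team)).map fc)).any (fun cat =>
          3 ≤ ((legs.filter (fun l => ft l == team)).countP
                 (fun l => fc l == cat && fd l == "demon") : Int))) = true) ↔
      ¬ ((PySem.Dict.counter ((legs.filter (fun l => fd l == "demon")).map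
            (fun l => (ft l, fc l)))).values.all (fun c => c < 3) = true) := by
  have hv : (PySem.Dict.counter ((legs.filter (fun l => fd l == "demon")).map
            (fun l => (ft l, fc l)))).values
      = (PySem.Set.ofList ((legs.filter (fun l => fd l == "demon")).map
            (fun l => (ft l, fc l)))).map
          (fun k => ((((legs.filter (fun l => fd l == "demon")).map
            (fun l => (ft l, fc l))).count k : Int))) := by
    simp only [PySem.Dict.values, PySem.Dict.items_counter, List.map_map]; rfl
  rw [hv, List.all_map]
  constructor
  · intro h hall
    obtain ⟨t, ht, h2⟩ := List.any_eq_true.mp h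
    obtain ⟨c, hc, h3⟩ := List.any_eq_true.mp h2
    rw [decide_eq_true_eq] at h3
    rw [pv_demon_count legs ft fc fd t c] at h3
    have h3' : 3 ≤ ((legs.filter (fun l => fd l == "demon")).map (fun l => (ft l, fc l))).count (t, c) := by
      exact_mod_cast h3
    have hmem : (t, c) ∈ (legs.filter (fun l => fd l == "demon")).map (fun l => (ft l, fc l)) :=
      List.count_pos_iff.mp (by omega)
    have := List.all_eq_true.mp hall (t, c) ((PySem.Set.mem_ofList _ _).mpr hmem)
    simp only [Function.comp, decide_eq_true_eq] at this
    omega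
  · intro h
    rw [Bool.not_eq_true, List.all_eq_false] at h
    obtain ⟨p, hp, hfalse⟩ := h
    simp only [Function.comp] at hfalse
    rw [show ∀ b : Bool, (¬ b = true) ↔ b = false from fun b => by simp] at hfalse
    rw [decide_eq_false_iff_not, not_lt] at hfalse
    have hpmem : p ∈ (legs.filter (fun l => fd l == "demon")).map (fun l => (ft l, fc l)) :=
      (PySem.Set.mem_ofList _ _).mp hp
    obtain ⟨l, hl, hpl⟩ := List.mem_map.mp hpmem
    obtain ⟨hlegs, hdem⟩ := List.mem_filter.mp hl
    subst hpl
    refine List.any_eq_true.mpr ⟨ft l, ?_, ?_⟩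
    · exact (PySem.Set.mem_ofList _ _).mpr (List.mem_map.mpr ⟨l, hlegs, rfl⟩)
    · refine List.any_eq_true.mpr ⟨fc l, ?_, ?_⟩
      · refine (PySem.Set.mem_ofList _ _).mpr (List.mem_map.mpr ⟨l, ?_, rfl⟩)
        exact List.mem_filter.mpr ⟨hlegs, by simp⟩
      · rw [decide_eq_true_eq, pv_demon_count legs ft fc fd (ft l) (fc l)]
        exact_mod_cast hfalse

-- ===== VERDICT (by name: the statement is the Claim_ definition above) =====
theorem lineup_valid_py_spec : Claim_equal_lineup_valid_py := by
  intro legs size _ _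
  unfold Spec_lineup_valid_py lineup_valid_py lineup_valid_py_alt
  dsimp only
  -- guard 1: duplicate players
  by_cases h1 : (PySem.Set.ofList (legs.map (fun l => pvGet l "player_name"))).length
      = (legs.map (fun l => pvGet l "player_name")).length
  case neg =>
    rw [if_pos h1, if_pos ((pv_dup_guard _).mp h1)]
  case pos =>
  have hb1 : ((PySem.Dict.counter (legs.map (fun l => pvGet l "player_name"))).values.any
      (fun c => 1 < c)) = false := by
    rw [← Bool.not_eq_true]
    exact fun hb => ((pv_dup_guard _).mpr hb) h1
  have hn1 : ¬ (((PySem.Dict.counter (legs.map (fun l => pvGet l "player_name"))).values.any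
      (fun c => 1 < c)) = true) := by rw [hb1]; exact Bool.false_ne_true
  rw [if_neg (fun hc => hc h1), if_neg hn1]
  -- guard 2: too many legs on one team
  have hm : (0 : Int) < (if size ≤ 4 then 2 else 3) := by split_ifs <;> norm_num
  by_cases h2 : ((PySem.List.max? (PySem.Dict.counter (legs.map (fun l => pvGet l "team"))).values
      (fun v => v)).getD 0) > (if size ≤ 4 then (2 : Int) else 3)
  case pos =>
    rw [if_pos h2, if_pos ((pv_max_guard _ _ hm).mp h2)]
  case neg =>
  have hb2 : ((PySem.Dict.counter (legs.map (fun l => pvGet l "team"))).values.any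
      (fun c => (if size ≤ 4 then (2 : Int) else 3) < c)) = false := by
    rw [← Bool.not_eq_true]
    exact fun hb => h2 ((pv_max_guard _ _ hm).mpr hb)
  have hn2 : ¬ (((PySem.Dict.counter (legs.map (fun l => pvGet l "team"))).values.any
      (fun c => (if size ≤ 4 then (2 : Int) else 3) < c)) = true) := by
    rw [hb2]; exact Bool.false_ne_true
  rw [if_neg h2, if_neg hn2]
  -- guard 3: all-goblin lineup
  by_cases h3 : ((legs.map (fun l => pvGet l "prop_tier")).all (fun t => t == "goblin")) = true
  case pos =>
    rw [if_pos h3, if_pos ((pv_goblin_all legs _).mp h3)]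
  case neg =>
  have hb3 : ¬ ((legs.countP (fun l => pvGet l "prop_tier" == "goblin") : Int)
      = (legs.length : Int)) := fun hb => h3 ((pv_goblin_all legs _).mpr hb)
  rw [if_neg h3, if_neg hb3]
  -- guard 4: two goblins in a 2-leg slip
  have hc4 : (size == 2 && decide (2 ≤ (legs.map (fun l => pvGet l "prop_tier")).count "goblin"))
      = (size == 2 && decide ((2 : Int) ≤ (legs.countP (fun l => pvGet l "prop_tier" == "goblin") : Int))) := by
    rw [pv_goblin_count legs]
    congr 1
    rw [decide_eq_decide]
    omega
  rw [hc4]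
  by_cases h4 : (size == 2 && decide ((2 : Int) ≤ (legs.countP (fun l => pvGet l "prop_tier" == "goblin") : Int))) = true
  case pos =>
    rw [if_pos h4, if_pos h4]
  case neg =>
  rw [if_neg h4, if_neg h4]
  -- guard 5: three demons of one category on one team
  by_cases h5 : ((PySem.Dict.counter ((legs.filter (fun l => pvGet l "prop_tier" == "demon")).map
      (fun l => (pvGet l "team", pvGet l "stat_category")))).values.all (fun c => c < 3)) = true
  case pos =>
    have hc5 := (pv_demon_guard legs (fun l => pvGet l "team") (fun l => pvGet l "stat_category")
      (fun l => pvGet l "prop_tier"))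
    rw [if_neg (fun ha => (hc5.mp ha) h5), h5]
  case neg =>
    have hc5 := (pv_demon_guard legs (fun l => pvGet l "team") (fun l => pvGet l "stat_category")
      (fun l => pvGet l "prop_tier"))
    rw [if_pos (hc5.mpr h5), ← Bool.not_eq_true] at *
    exact (Bool.not_eq_true _).mp h5 ▸ rfl
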